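-- pv_equiv track=rewrite | github.com/jesse-tnei/Daily_Challenges | a_31_12_24_TDD_Longest_word_in_a_list.py | length_list
-- ===== SOURCE A (Python) =====
-- def length_list(word_string_list):
--     # confirm input present
--     if not word_string_list:
--         raise ValueError('Input is an empty list')
--
--     # confirm input is a list
--     if not isinstance(word_string_list, list):
--         raise TypeError('Input not a list, please try again')
--
--     # confirm all input elements are string type
--     if not all(isinstance(word, str) for word in word_string_list):
--         raise ValueError('List contains non-string elements')
--
--     # initialise empty dictionary
--     word_len_dict = {}
--
--     # zip the two lists up into a dictionary
--     for word in word_string_list: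
--         word_len = len(word)
--
--         # if first time we are finding word of that length
--         if word_len not in word_len_dict:
--             # create a list for it in case we come across another word with similar length
--             word_len_dict[word_len] = [word]
--         else:
--             # append new word to original list
--             word_len_dict[word_len].append(word)
--     return word_len_dict
-- ===== SOURCE B (Python) =====
-- def length_list(word_string_list):
--     # confirm input present
--     if not word_string_list:
--         raise ValueError('Input is an empty list')
--
--     # confirm input is a list
--     if not isinstance(word_string_list, list):
--         raise TypeError('Input not a list, please try again')
--
--     # confirm all input elements are string type
--     if not all(isinstance(word, str) for word in word_string_list):
--         raise ValueError('List contains non-string elements')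
--
--     # distinct lengths in first-occurrence order, then one filter pass per length
--     lengths = dict.fromkeys(len(word) for word in word_string_list)
--     return {n: [word for word in word_string_list if len(word) == n] for n in lengths}
-- ===== Notes on version B (the rewrite author's own statement) =====
-- stated objective: alternative
-- what changed: Replaces the single-pass dict mutation (insert-or-append per word) with a two-pass scheme: dedup the word lengths in first-occurrence order, then build each group by filtering the list, so no dict is mutated.
import Mathlib
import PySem

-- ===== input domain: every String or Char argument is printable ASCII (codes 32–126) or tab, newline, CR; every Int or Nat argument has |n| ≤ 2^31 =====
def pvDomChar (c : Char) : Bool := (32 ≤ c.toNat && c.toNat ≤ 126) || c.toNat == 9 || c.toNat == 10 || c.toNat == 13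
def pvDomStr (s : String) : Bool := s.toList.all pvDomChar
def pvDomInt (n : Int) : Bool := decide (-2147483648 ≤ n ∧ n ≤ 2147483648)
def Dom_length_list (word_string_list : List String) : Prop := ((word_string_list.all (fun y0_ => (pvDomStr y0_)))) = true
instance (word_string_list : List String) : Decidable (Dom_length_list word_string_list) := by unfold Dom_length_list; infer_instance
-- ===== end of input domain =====

-- B groups words by length via dedup-of-lengths plus one filter pass per length instead of A's
-- single-pass dict mutation (alternative decomposition, same output including key order);
-- the three Python guards are identical, so both raise exactly on the empty list, which Pre_ excludes.

-- ===== PORT A =====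
-- one-pass loop: for each word, insert a fresh singleton group or append to the existing one
def length_list (word_string_list : List String) : List (Int × List String) :=
  (word_string_list.foldl
    (fun d w =>
      let wl := PySem.Str.len w
      if d.contains wl = false then d.insert wl [w]
      else d.modify wl [] (fun l => l ++ [w]))
    (PySem.Dict.empty : PySem.Dict Int (List String))).items

-- ===== PORT B =====
-- two passes: distinct lengths in first-occurrence order, then a filter per length
def length_list_alt (word_string_list : List String) : List (Int × List String) :=
  (PySem.List.dedup (word_string_list.map (fun w => PySem.Str.len w))).map
    (fun n => (n, word_string_list.filter (fun w => PySem.Str.len w == n)))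

-- ===== PRECONDITION & SPEC =====
-- Pre_ excludes exactly the empty list, where the Python A raises ValueError.
def Pre_length_list (word_string_list : List String) : Prop := word_string_list ≠ []
instance (word_string_list : List String) : Decidable (Pre_length_list word_string_list) := by unfold Pre_length_list; infer_instance
def pvWitness_length_list : List String := ["ab", "c", "de"]
def Spec_length_list (word_string_list : List String) (out : List (Int × List String)) : Prop := out = length_list_alt word_string_list
instance (word_string_list : List String) (out : List (Int × List String)) : Decidable (Spec_length_list word_string_list out) := by unfold Spec_length_list; infer_instance

-- ===== CLAIM (what is proved, stated in full; the proofs are below) =====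
def Claim_equal_length_list : Prop := ∀ (word_string_list : List String), Dom_length_list word_string_list → Pre_length_list word_string_list → Spec_length_list word_string_list (length_list word_string_list)

-- ===== LEMMAS AND PROOFS =====

-- A's branching step is, pointwise, the uniform modify step (modify inserts f [] at an absent key)
theorem length_list_step_eq (d : PySem.Dict Int (List String)) (w : String) :
    (let wl := PySem.Str.len w
     if d.contains wl = false then d.insert wl [w]
     else d.modify wl [] (fun l => l ++ [w]))
    = d.modify (PySem.Str.len w) [] (fun l => l ++ [w]) := by
  by_cases h : d.contains (PySem.Str.len w) = false
  · rw [if_pos h]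
    have hany : d.items.any (fun p => p.1 == PySem.Str.len w) = false := h
    have hfind : d.items.find? (fun p => p.1 == PySem.Str.len w) = none :=
      List.find?_eq_none.mpr (List.any_eq_false.mp hany)
    simp only [PySem.Str.len_eq, String.length_toList] at hfind
    simp [PySem.Dict.modify, PySem.Dict.getD, PySem.Dict.get?, hfind]
  · rw [if_neg h]

-- ===== VERDICT (by name: the statement is the Claim_ definition above) =====
theorem length_list_spec : Claim_equal_length_list := by
  intro ws _ _
  show length_list ws = length_list_alt ws
  unfold length_list length_list_alt
  have hstep : ∀ (d : PySem.Dict Int (List String)) (w : String),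
      (let wl := PySem.Str.len w
       if d.contains wl = false then d.insert wl [w]
       else d.modify wl [] (fun l => l ++ [w]))
      = d.modify (PySem.Str.len w) [] (fun l => l ++ [w]) := length_list_step_eq
  rw [funext fun d => funext fun w => hstep d w]
  have hmapfold : ws.foldl (fun d w => d.modify (PySem.Str.len w) [] (fun l => l ++ [w]))
      (PySem.Dict.empty : PySem.Dict Int (List String))
      = (ws.map (fun w => (PySem.Str.len w, w))).foldl
          (fun d p => d.modify p.1 [] (fun l => l ++ [p.2]))
          (PySem.Dict.empty : PySem.Dict Int (List String)) := by
    rw [List.foldl_map]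
  rw [hmapfold]
  set D := (ws.map (fun w => (PySem.Str.len w, w))).foldl
      (fun d p => d.modify p.1 [] (fun l => l ++ [p.2]))
      (PySem.Dict.empty : PySem.Dict Int (List String)) with hD
  have hkeys : D.keys = PySem.List.dedup (ws.map (fun w => PySem.Str.len w)) := by
    rw [hD, PySem.Dict.keys_foldl_modify_key (ws.map (fun w => (PySem.Str.len w, w)))
          Prod.fst [] (fun _ p v => v ++ [p.2]) PySem.Dict.empty]
    simp [PySem.Set.update_eq_append_filter, List.map_map, Function.comp_def]
  have hnd : D.keys.Nodup := by
    rw [hD]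
    exact PySem.Dict.nodup_keys_foldl_modify_key (ws.map (fun w => (PySem.Str.len w, w)))
      Prod.fst [] (fun _ p v => v ++ [p.2]) PySem.Dict.empty (by simp [PySem.Dict.empty])
  have hgetD : ∀ c : Int, D.getD c [] = ws.filter (fun w => PySem.Str.len w == c) := by
    intro c
    rw [hD, PySem.Dict.getD_foldl_modify_append (ws.map (fun w => (PySem.Str.len w, w)))
          PySem.Dict.empty c]
    simp [PySem.Dict.empty, PySem.Dict.getD, PySem.Dict.get?, List.filter_map,
      List.map_map, Function.comp_def]
  rw [PySem.Dict.items_eq_map_keys D hnd [], hkeys]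
  exact List.map_congr_left (fun n _ => by rw [hgetD n])
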